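-- pv_equiv track=rewrite | github.com/HackBuddies/shelfie | kai_searcher.py | get_horizontal_lines
-- ===== SOURCE A (Python) =====
-- def get_horizontal_lines(real_pts, label_height, label_width, big_img_width):
--     max_diff_height = 40
--
--     lines = []
--     curr_line = []
--     prev_pt = None
--
--     real_pts = [[pt[0], pt[1] + label_height] for pt in real_pts]
--
--     for pt in sorted(real_pts, key=lambda x: x[1]):
--         if prev_pt is None:
--             prev_pt = pt
--             curr_line = [pt]
--             continue
--         diff_height = abs(prev_pt[1] - pt[1])
--         prev_pt = pt
--         if diff_height > max_diff_height:
--             lines.append(curr_line)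
--             curr_line = [pt]
--             continue
--         else:
--             curr_line.append(pt)
--     lines.append(curr_line)
--     for line in lines:
--         line.insert(0, [-label_width, line[0][1]])
--         line.append([big_img_width, line[-1][1]])
--         line.sort(key=lambda x: x[0])
--     return lines
-- ===== SOURCE B (Python) =====
-- def get_horizontal_lines(real_pts, label_height, label_width, big_img_width):
--     pts = sorted([[p[0], p[1] + label_height] for p in real_pts], key=lambda p: p[1])
--
--     def split(rest):
--         i = 1
--         while i < len(rest) and abs(rest[i - 1][1] - rest[i][1]) <= 40:
--             i += 1
--         head, tail = rest[:i], rest[i:]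
--         return [head] + split(tail) if tail else [head]
--
--     return [sorted([[-label_width, g[0][1]]] + g + [[big_img_width, g[-1][1]]],
--                    key=lambda p: p[0])
--             for g in split(pts)]
-- ===== Notes on version B (the rewrite author's own statement) =====
-- stated objective: alternative
-- what changed: B replaces A's single accumulator pass (prev_pt/curr_line/lines state machine) by a recursive splitter that repeatedly cuts the y-sorted list at the first adjacent gap > 40, then decorates each group with the two sentinels in one comprehension.
import Mathlib
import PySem

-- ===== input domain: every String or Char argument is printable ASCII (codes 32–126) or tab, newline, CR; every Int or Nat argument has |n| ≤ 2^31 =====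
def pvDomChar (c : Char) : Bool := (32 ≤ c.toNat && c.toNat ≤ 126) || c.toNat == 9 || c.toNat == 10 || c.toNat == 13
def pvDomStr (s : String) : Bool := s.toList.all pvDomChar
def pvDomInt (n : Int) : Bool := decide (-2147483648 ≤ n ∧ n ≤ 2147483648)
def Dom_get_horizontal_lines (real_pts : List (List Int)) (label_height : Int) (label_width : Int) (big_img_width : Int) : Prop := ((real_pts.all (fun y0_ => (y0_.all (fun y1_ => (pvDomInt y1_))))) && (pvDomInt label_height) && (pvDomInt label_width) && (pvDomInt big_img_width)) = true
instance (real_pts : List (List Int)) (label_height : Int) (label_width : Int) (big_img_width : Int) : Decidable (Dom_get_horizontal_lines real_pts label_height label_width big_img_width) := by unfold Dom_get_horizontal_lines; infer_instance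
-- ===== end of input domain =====

-- B replaces A's one-pass prev_pt/curr_line accumulator grouping by a recursive gap-splitter over
-- the y-sorted list; equal return value on Pre_ (inputs where the Python A returns normally).

-- shared accessors: pt[0] and pt[1] (total forms; Pre_ keeps every real Python access in range)
def pvX (pt : List Int) : Int := (PySem.List.pyGet? pt 0).getD 0
def pvY (pt : List Int) : Int := (PySem.List.pyGet? pt 1).getD 0

-- ===== PORT A =====
-- the for-loop over sorted(real_pts, key=λx: x[1]) with state (prev_pt, curr_line, lines)
def pvLoopA : List (List Int) → Option (List Int) → List (List Int) → List (List (List Int)) → List (List (List Int))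
  | [], _, curr, lines => lines ++ [curr]          -- final lines.append(curr_line)
  | pt :: rest, none, _, lines => pvLoopA rest (some pt) [pt] lines
  | pt :: rest, some prev, curr, lines =>
      if |pvY prev - pvY pt| > 40 then pvLoopA rest (some pt) [pt] (lines ++ [curr])
      else pvLoopA rest (some pt) (curr ++ [pt]) lines

-- line.insert(0, [-w, line[0][1]]); line.append([W, line[-1][1]]); line.sort(key=λx: x[0])
def pvDecorateA (w W : Int) (line : List (List Int)) : List (List Int) :=
  let line1 := [-w, pvY ((PySem.List.pyGet? line 0).getD [])] :: line
  let line2 := line1 ++ [[W, pvY ((PySem.List.pyGet? line1 (-1)).getD [])]]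
  PySem.List.sorted line2 (fun p => pvX p) false

def get_horizontal_lines (real_pts : List (List Int)) (label_height : Int) (label_width : Int) (big_img_width : Int) : List (List (List Int)) :=
  let pts := real_pts.map (fun pt => [pvX pt, pvY pt + label_height])
  let lines := pvLoopA (PySem.List.sorted pts (fun p => pvY p) false) none [] []
  lines.map (pvDecorateA label_width big_img_width)

-- ===== PORT B =====
-- the while loop of split: advance i while the adjacent gap stays ≤ 40; returns (rest[1:i], rest[i:])
def pvTakeAdj : List Int → List (List Int) → List (List Int) × List (List Int)
  | _, [] => ([], [])
  | p, q :: rest =>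
      if |pvY p - pvY q| ≤ 40 then
        let r := pvTakeAdj q rest
        (q :: r.1, r.2)
      else ([], q :: rest)

theorem pvTakeAdj_snd_length : ∀ (l : List (List Int)) (p : List Int), (pvTakeAdj p l).2.length ≤ l.length
  | [], _ => Nat.le_refl _
  | q :: rest, p => by
    simp only [pvTakeAdj]
    split
    · exact Nat.le_succ_of_le (pvTakeAdj_snd_length rest q)
    · exact Nat.le_refl _

-- split(rest): head = rest[:i], tail = rest[i:]; [head] + split(tail) if tail else [head]
def pvSplitB : List (List Int) → List (List (List Int))
  | [] => [[]]
  | p :: rest =>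
      let r := pvTakeAdj p rest
      if r.2 = [] then [p :: r.1] else (p :: r.1) :: pvSplitB r.2
termination_by l => l.length
decreasing_by
  exact Nat.lt_succ_of_le (pvTakeAdj_snd_length rest p)

-- sorted([[-w, g[0][1]]] + g + [[W, g[-1][1]]], key=λp: p[0])
def pvDecorateB (w W : Int) (g : List (List Int)) : List (List Int) :=
  PySem.List.sorted ([[-w, pvY ((PySem.List.pyGet? g 0).getD [])]] ++ g ++ [[W, pvY ((PySem.List.pyGet? g (-1)).getD [])]]) (fun p => pvX p) false

def get_horizontal_lines_alt (real_pts : List (List Int)) (label_height : Int) (label_width : Int) (big_img_width : Int) : List (List (List Int)) :=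
  let pts := PySem.List.sorted (real_pts.map (fun p => [pvX p, pvY p + label_height])) (fun p => pvY p) false
  (pvSplitB pts).map (pvDecorateB label_width big_img_width)

-- ===== PRECONDITION & SPEC =====
-- Pre_ excludes exactly the inputs where the Python A raises IndexError: an empty real_pts
-- (line.insert reads line[0] of the empty final group) or a point with fewer than 2 coordinates
-- (pt[1] in the comprehension). B raises there too.
def Pre_get_horizontal_lines (real_pts : List (List Int)) (label_height : Int) (label_width : Int) (big_img_width : Int) : Prop :=
  real_pts ≠ [] ∧ ∀ pt ∈ real_pts, 2 ≤ pt.length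
instance (real_pts : List (List Int)) (label_height : Int) (label_width : Int) (big_img_width : Int) : Decidable (Pre_get_horizontal_lines real_pts label_height label_width big_img_width) := by unfold Pre_get_horizontal_lines; infer_instance

def pvWitness_get_horizontal_lines : List (List Int) × Int × Int × Int := ([[1, 2], [3, 100]], 5, 7, 500)

def Spec_get_horizontal_lines (real_pts : List (List Int)) (label_height : Int) (label_width : Int) (big_img_width : Int) (out : List (List (List Int))) : Prop := out = get_horizontal_lines_alt real_pts label_height label_width big_img_width
instance (real_pts : List (List Int)) (label_height : Int) (label_width : Int) (big_img_width : Int) (out : List (List (List Int))) : Decidable (Spec_get_horizontal_lines real_pts label_height label_width big_img_width out) := by unfold Spec_get_horizontal_lines; infer_instance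

-- ===== CLAIM (what is proved, stated in full; the proofs are below) =====
def Claim_equal_get_horizontal_lines : Prop := ∀ (real_pts : List (List Int)) (label_height : Int) (label_width : Int) (big_img_width : Int), Dom_get_horizontal_lines real_pts label_height label_width big_img_width → Pre_get_horizontal_lines real_pts label_height label_width big_img_width → Spec_get_horizontal_lines real_pts label_height label_width big_img_width (get_horizontal_lines real_pts label_height label_width big_img_width)

-- ===== LEMMAS AND PROOFS =====

-- the two decoration steps build the same list before the same stable sort
theorem decorate_eq (w W : Int) (line : List (List Int)) :
    pvDecorateA w W line = pvDecorateB w W line := by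
  cases line with
  | nil => rfl
  | cons x xs =>
    simp [pvDecorateA, pvDecorateB, PySem.List.pyGet?_neg_one,
          List.getLast?_cons_cons]

-- A's accumulator loop, started after the first point, produces the gap-splitting of B
theorem loop_eq_split : ∀ (rest : List (List Int)) (p : List Int) (curr : List (List Int)) (lines : List (List (List Int))),
    pvLoopA rest (some p) curr lines =
      lines ++ ((curr ++ (pvTakeAdj p rest).1) ::
        (if (pvTakeAdj p rest).2 = [] then [] else pvSplitB (pvTakeAdj p rest).2)) := by
  intro rest
  induction rest with
  | nil => intro p curr lines; simp [pvLoopA, pvTakeAdj]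
  | cons q rs ih =>
    intro p curr lines
    simp only [pvLoopA, pvTakeAdj]
    by_cases h : |pvY p - pvY q| ≤ 40
    · rw [if_neg (by omega), if_pos h, ih]
      simp
    · rw [if_pos (by omega), if_neg h, ih]
      simp only [pvSplitB]
      by_cases h2 : (pvTakeAdj q rs).2 = [] <;> simp [h2]

theorem split_head (p : List Int) (rest : List (List Int)) :
    pvSplitB (p :: rest) =
      ((p :: (pvTakeAdj p rest).1) ::
        (if (pvTakeAdj p rest).2 = [] then [] else pvSplitB (pvTakeAdj p rest).2)) := by
  rw [pvSplitB]
  by_cases h : (pvTakeAdj p rest).2 = [] <;> simp [h]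

-- ===== VERDICT (by name: the statement is the Claim_ definition above) =====

theorem get_horizontal_lines_spec : Claim_equal_get_horizontal_lines := by
  intro real_pts h w W _dom _pre
  unfold Spec_get_horizontal_lines get_horizontal_lines get_horizontal_lines_alt
  have hmap : ∀ ls : List (List (List Int)),
      ls.map (pvDecorateA w W) = ls.map (pvDecorateB w W) :=
    fun ls => List.map_congr_left (fun l _ => decorate_eq w W l)
  rw [hmap]
  congr 1
  cases hs : PySem.List.sorted (real_pts.map (fun p => [pvX p, pvY p + h])) (fun p => pvY p) false with
  | nil => simp [pvLoopA, pvSplitB]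
  | cons p rest =>
    show pvLoopA (p :: rest) none [] [] = _
    simp only [pvLoopA]
    rw [loop_eq_split, split_head]
    simp
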